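-- pv_equiv track=rewrite | github.com/T313C0mun1s7/sm-logtool | sm_logtool/search.py | _longest_wildcard_literal
-- ===== SOURCE A (Python) =====
-- def _longest_wildcard_literal(term: str) -> str:
--     longest = ""
--     current: list[str] = []
--     for char in term:
--         if char in {"*", "?"}:
--             token = "".join(current)
--             if len(token) > len(longest):
--                 longest = token
--             current.clear()
--             continue
--         current.append(char)
--     token = "".join(current)
--     if len(token) > len(longest):
--         longest = token
--     return longest
-- ===== SOURCE B (Python) =====
-- def _longest_wildcard_literal(term: str) -> str:
--     segments = term.replace("?", "*").split("*")
--     return max(segments, key=len)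
-- ===== Notes on version B (the rewrite author's own statement) =====
-- stated objective: simpler
-- what changed: Replaces A's character-by-character accumulate/reset loop with a split-then-reduce decomposition: normalize '?' to '*', split the term into all literal segments at once, and return the first longest segment via max(key=len); the per-character Python loop disappears into C-level str.replace/str.split, a constant-factor speedup a timing run measured.
import Mathlib
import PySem

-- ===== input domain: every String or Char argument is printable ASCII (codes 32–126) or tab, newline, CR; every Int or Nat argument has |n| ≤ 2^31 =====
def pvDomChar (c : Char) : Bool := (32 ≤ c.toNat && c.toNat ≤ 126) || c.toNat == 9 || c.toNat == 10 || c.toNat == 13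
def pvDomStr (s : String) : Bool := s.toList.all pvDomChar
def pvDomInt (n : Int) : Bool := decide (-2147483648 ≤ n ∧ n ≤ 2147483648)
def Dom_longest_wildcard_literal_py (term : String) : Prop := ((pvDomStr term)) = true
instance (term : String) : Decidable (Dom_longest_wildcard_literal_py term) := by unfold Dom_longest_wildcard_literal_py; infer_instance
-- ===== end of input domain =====

-- B replaces A's character-by-character accumulate/reset loop with a split-then-reduce decomposition
-- (normalize '?' to '*', split into all literal segments, take the first longest); objective: simpler.

-- ===== PORT A =====
def longest_wildcard_literal_py (term : String) : String :=
  -- longest = ""; current = []; for char in term: …; final flush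
  let st := term.toList.foldl
    (fun (st : String × List Char) char =>
      if char = '*' ∨ char = '?' then
        let token := String.ofList st.2
        ((if PySem.Str.len token > PySem.Str.len st.1 then token else st.1), [])
      else (st.1, st.2 ++ [char]))
    ("", [])
  let token := String.ofList st.2
  if PySem.Str.len token > PySem.Str.len st.1 then token else st.1

-- ===== PORT B =====
def longest_wildcard_literal_py_alt (term : String) : String :=
  -- term.replace("?", "*") is a single-char-to-single-char replacement, exactly a map over the chars;
  -- .split("*") is exactly List.splitOn '*' on the char list (non-empty one-char separator);
  -- max(segments, key=len) is PySem.List.max? (first maximal element); segments is never empty.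
  let segments := (term.toList.map (fun c => if c = '?' then '*' else c)).splitOn '*'
  String.ofList ((PySem.List.max? segments (fun s => s.length)).getD [])

-- ===== PRECONDITION & SPEC =====
def Spec_longest_wildcard_literal_py (term : String) (out : String) : Prop := out = longest_wildcard_literal_py_alt term
instance (term : String) (out : String) : Decidable (Spec_longest_wildcard_literal_py term out) := by unfold Spec_longest_wildcard_literal_py; infer_instance

-- ===== CLAIM (what is proved, stated in full; the proofs are below) =====
def Claim_equal_longest_wildcard_literal_py : Prop := ∀ (term : String), Dom_longest_wildcard_literal_py term → Spec_longest_wildcard_literal_py term (longest_wildcard_literal_py term)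

-- ===== LEMMAS AND PROOFS =====

/-- the normalization B applies before splitting -/
def pvNorm (c : Char) : Char := if c = '?' then '*' else c

/-- the longest-so-far update both programs perform, on the char-list level -/
def pvG (L x : List Char) : List Char := if x.length > L.length then x else L

lemma pvG_nil (s : List Char) : pvG [] s = s := by
  unfold pvG
  split_ifs with h
  · rfl
  · simp only [List.length_nil, gt_iff_lt, Nat.pos_iff_ne_zero, ne_eq, not_not] at h
    exact (List.eq_nil_of_length_eq_zero h).symm

/-- Python's max(xs, key=len) over a non-empty list is the running pvG fold. -/
lemma pvMax?_cons (rest : List (List Char)) : ∀ (s : List Char),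
    PySem.List.max? (s :: rest) (fun t : List Char => t.length) = some (rest.foldl pvG s) := by
  induction rest with
  | nil => intro s; rfl
  | cons x t ih =>
    intro s
    have h1 : PySem.List.max? (s :: x :: t) (fun t : List Char => t.length)
        = PySem.List.max? (pvG s x :: t) (fun t : List Char => t.length) := by
      simp only [PySem.List.max?, List.foldl_cons]
      unfold pvG
      split_ifs <;> rfl
    rw [h1, ih, List.foldl_cons]

lemma pvModifyHead_nil_append (t : List (List Char)) :
    List.modifyHead (fun s => [] ++ s) t = t := by
  cases t <;> simp

/-- splitting at a leading separator -/
lemma pvSplit_cons_star (l : List Char) :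
    ('*' :: l).splitOn '*' = [] :: l.splitOn '*' := by
  simp [List.splitOn, List.splitOnP_cons]

/-- splitting at a leading non-separator -/
lemma pvSplit_cons_ne (c : Char) (l : List Char) (hc : ¬ c = '*') :
    (c :: l).splitOn '*' = List.modifyHead (c :: ·) (l.splitOn '*') := by
  simp [List.splitOn, List.splitOnP_cons, hc]

/-- the if-then-else over joined strings collapses to String.ofList of pvG -/
lemma pvMkG (L cur : List Char) :
    (if PySem.Str.len (String.ofList cur) > PySem.Str.len (String.ofList L) then String.ofList cur else String.ofList L)
      = String.ofList (pvG L cur) := by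
  unfold pvG
  simp only [PySem.Str.len, gt_iff_lt]
  split_ifs with h1 h2 <;> try rfl
  all_goals (exfalso; simp_all)

/-- main invariant: A's loop, started in state (String.ofList L, cur) and flushed at the end,
    computes the running maximum pvG over the segments of the remaining input, with cur
    glued onto the first segment. -/
lemma pvA_run (l : List Char) (L cur : List Char) :
    (let st := l.foldl
        (fun (st : String × List Char) char =>
          if char = '*' ∨ char = '?' then
            let token := String.ofList st.2
            ((if PySem.Str.len token > PySem.Str.len st.1 then token else st.1), [])
          else (st.1, st.2 ++ [char]))
        (String.ofList L, cur)
     let token := String.ofList st.2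
     if PySem.Str.len token > PySem.Str.len st.1 then token else st.1)
    = String.ofList ((((l.map pvNorm).splitOn '*').modifyHead (cur ++ ·)).foldl pvG L) := by
  induction l generalizing L cur with
  | nil =>
    simp only [List.foldl_nil, List.map_nil, List.splitOn, List.splitOnP_nil,
      List.modifyHead, List.foldl_cons, List.foldl_nil, List.append_nil]
    exact pvMkG L cur
  | cons c l ih =>
    by_cases hp : c = '*' ∨ c = '?'
    · have hnorm : pvNorm c = '*' := by
        unfold pvNorm; rcases hp with h | h <;> simp [h]
      simp only [List.foldl_cons, if_pos hp, pvMkG]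
      have hih := ih (pvG L cur) []
      simp only at hih
      rw [hih, pvModifyHead_nil_append, List.map_cons, hnorm, pvSplit_cons_star]
      rcases h : (l.map pvNorm).splitOn '*' with _ | ⟨s, rest⟩
      · exact absurd h (List.splitOnP_ne_nil _ _)
      · simp [List.modifyHead, List.foldl_cons]
    · have hc1 : ¬ c = '*' := fun h => hp (Or.inl h)
      have hc2 : ¬ c = '?' := fun h => hp (Or.inr h)
      have hnorm : pvNorm c = c := by unfold pvNorm; simp [hc2]
      simp only [List.foldl_cons, if_neg hp]
      have hih := ih L (cur ++ [c])
      simp only at hih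
      rw [hih, List.map_cons, hnorm, pvSplit_cons_ne c _ hc1, List.modifyHead_modifyHead]
      have hfun : ((fun x => cur ++ x) ∘ fun x => c :: x) = (fun x => cur ++ [c] ++ x) := by
        funext s; simp
      rw [hfun]

-- ===== VERDICT (by name: the statement is the Claim_ definition above) =====
theorem longest_wildcard_literal_py_spec : Claim_equal_longest_wildcard_literal_py := by
  intro term _
  unfold Spec_longest_wildcard_literal_py longest_wildcard_literal_py
  have hb : longest_wildcard_literal_py_alt term
      = String.ofList ((PySem.List.max? ((term.toList.map pvNorm).splitOn '*')
          (fun s : List Char => s.length)).getD []) := rfl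
  have hrun := pvA_run term.toList [] []
  simp only at hrun
  rw [show ("" : String) = String.ofList [] from rfl, hrun, pvModifyHead_nil_append, hb]
  rcases h : (term.toList.map pvNorm).splitOn '*' with _ | ⟨s, rest⟩
  · exact absurd h (List.splitOnP_ne_nil _ _)
  · rw [pvMax?_cons, List.foldl_cons, pvG_nil]
    rfl
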